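-- pv_equiv track=rewrite | github.com/Xilinx/mlir-aie | utils/generate_events_enum.py | write_enum_items
-- ===== SOURCE A (Python) =====
-- def write_enum_items(dict):
--     """Format dictionary as Python enum items, filling gaps with reserved placeholders."""
--     if not dict:
--         return "    pass  # No events defined"
--
--     # Fill gaps with rsvd_XX placeholders
--     if dict:
--         min_val = min(dict.keys())
--         max_val = max(dict.keys())
--         filled_dict = {}
--         for val in range(min_val, max_val + 1):
--             if val in dict:
--                 filled_dict[val] = dict[val]
--             else:
--                 filled_dict[val] = f"rsvd_{val}"
--         dict = filled_dict
--
--     return "\n".join("    {} = {}".format(name, num) for num, name in dict.items())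
-- ===== SOURCE B (Python) =====
-- def write_enum_items(dict):
--     """Format dictionary as Python enum items, filling gaps with reserved placeholders."""
--     if not dict:
--         return "    pass  # No events defined"
--     lines = []
--     prev = None
--     for num in sorted(dict):
--         if prev is not None:
--             for v in range(prev + 1, num):
--                 lines.append("    rsvd_{} = {}".format(v, v))
--         lines.append("    {} = {}".format(dict[num], num))
--         prev = num
--     return "\n".join(lines)
-- ===== Notes on version B (the rewrite author's own statement) =====
-- stated objective: alternative
-- what changed: B sorts the keys once and scans consecutive sorted keys, emitting the rsvd placeholder lines for each gap between neighbours directly, instead of A's pass over the whole range(min,max+1) with a per-value membership test building an intermediate gap-filled dict that is then re-iterated.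
import Mathlib
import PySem

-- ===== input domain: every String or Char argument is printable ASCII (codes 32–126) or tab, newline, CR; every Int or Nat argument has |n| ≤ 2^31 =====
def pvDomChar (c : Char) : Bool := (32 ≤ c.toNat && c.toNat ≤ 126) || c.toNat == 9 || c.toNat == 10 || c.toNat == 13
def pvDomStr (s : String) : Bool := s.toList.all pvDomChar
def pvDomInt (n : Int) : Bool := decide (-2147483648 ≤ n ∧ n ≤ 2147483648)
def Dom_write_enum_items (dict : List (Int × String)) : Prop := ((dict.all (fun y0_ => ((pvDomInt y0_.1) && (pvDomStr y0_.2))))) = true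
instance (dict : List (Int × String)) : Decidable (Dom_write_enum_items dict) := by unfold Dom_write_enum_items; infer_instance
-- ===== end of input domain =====

-- B sorts the keys once and fills gaps between consecutive sorted keys directly, instead of
-- A's per-value membership scan over range(min, max+1) building an intermediate dict (objective: alternative).

-- ===== PORT A =====
-- the dict parameter arrives as an association list; Python's dict construction is PySem.Dict.ofList
def write_enum_items (dict : List (Int × String)) : String :=
  let d := PySem.Dict.ofList dict
  if d.items = [] then "    pass  # No events defined"
  else
    match PySem.List.min? d.keys (fun k => k), PySem.List.max? d.keys (fun k => k) with
    | some min_val, some max_val =>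
      let filled := (PySem.List.pyRange min_val (max_val + 1) 1).foldl
        (fun fd v =>
          if d.contains v then fd.insert v (d.getD v "")   -- dict[val]; guarded by 'val in dict', so getD's default is never used
          else fd.insert v ("rsvd_" ++ PySem.Int.toStr v))
        PySem.Dict.empty
      PySem.Str.join "\n" (filled.items.map (fun p => "    " ++ p.2 ++ " = " ++ PySem.Int.toStr p.1))
    | _, _ => ""   -- unreachable: keys are nonempty here, min?/max? return some

-- ===== PORT B =====
-- the for-loop of Source B over sorted(dict), with the 'prev'/'lines' state
def bLoop (d : PySem.Dict Int String) : List Int → Option Int → List String → List String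
  | [], _, lines => lines
  | num :: rest, prev, lines =>
    let lines' :=
      match prev with
      | none => lines
      | some p => lines ++ (PySem.List.pyRange (p + 1) num 1).map
          (fun v => "    rsvd_" ++ PySem.Int.toStr v ++ " = " ++ PySem.Int.toStr v)
    bLoop d rest (some num)
      (lines' ++ ["    " ++ d.getD num "" ++ " = " ++ PySem.Int.toStr num])   -- dict[num]; num is a key of d, default unused

def write_enum_items_alt (dict : List (Int × String)) : String :=
  let d := PySem.Dict.ofList dict
  if d.items = [] then "    pass  # No events defined"
  else PySem.Str.join "\n" (bLoop d (PySem.List.sorted d.keys (fun k => k) false) none [])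

-- ===== PRECONDITION & SPEC =====
def Spec_write_enum_items (dict : List (Int × String)) (out : String) : Prop := out = write_enum_items_alt dict
instance (dict : List (Int × String)) (out : String) : Decidable (Spec_write_enum_items dict out) := by unfold Spec_write_enum_items; infer_instance

-- ===== CLAIM (what is proved, stated in full; the proofs are below) =====
def Claim_equal_write_enum_items : Prop := ∀ (dict : List (Int × String)), Dom_write_enum_items dict → Spec_write_enum_items dict (write_enum_items dict)

-- ===== LEMMAS AND PROOFS =====

-- the common line shape both sides produce for a value v
def pvLine (d : PySem.Dict Int String) (v : Int) : String :=
  "    " ++ (if d.contains v then d.getD v "" else "rsvd_" ++ PySem.Int.toStr v) ++ " = " ++ PySem.Int.toStr v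

theorem pvLine_rsvd (d : PySem.Dict Int String) (v : Int) (h : d.contains v = false) :
    pvLine d v = "    rsvd_" ++ PySem.Int.toStr v ++ " = " ++ PySem.Int.toStr v := by
  unfold pvLine
  rw [h]
  simp only [Bool.false_eq_true, if_false]
  rw [← String.append_assoc]
  rfl

theorem pvLine_key (d : PySem.Dict Int String) (v : Int) (h : d.contains v = true) :
    pvLine d v = "    " ++ d.getD v "" ++ " = " ++ PySem.Int.toStr v := by
  unfold pvLine; rw [h]; simp

theorem filled_items (d : PySem.Dict Int String) (a b : Int) :
    ((PySem.List.pyRange a b 1).foldl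
      (fun fd v =>
        if d.contains v then fd.insert v (d.getD v "")
        else fd.insert v ("rsvd_" ++ PySem.Int.toStr v))
      PySem.Dict.empty).items
    = (PySem.List.pyRange a b 1).map
        (fun v => (v, if d.contains v then d.getD v "" else "rsvd_" ++ PySem.Int.toStr v)) := by
  have hbody : (fun (fd : PySem.Dict Int String) v =>
        if d.contains v then fd.insert v (d.getD v "")
        else fd.insert v ("rsvd_" ++ PySem.Int.toStr v))
      = (fun fd v => fd.insert v (if d.contains v then d.getD v "" else "rsvd_" ++ PySem.Int.toStr v)) := by
    funext fd v; by_cases h : d.contains v <;> simp [h]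
  rw [hbody]
  have := PySem.Dict.items_foldl_insert_fresh (l := PySem.List.pyRange a b 1)
      (k := fun v => v)
      (v := fun v => if d.contains v then d.getD v "" else "rsvd_" ++ PySem.Int.toStr v)
      (d := PySem.Dict.empty)
      (by intro x hx; simp [PySem.Dict.contains_empty])
      (by simpa using PySem.List.nodup_pyRange_one a b)
  simpa [PySem.Dict.items] using this

theorem lastD_cons (k : Int) (rest : List Int) (p : Int) :
    (k :: rest).getLast?.getD p = rest.getLast?.getD k := by
  cases rest with
  | nil => simp
  | cons b t => rw [List.getLast?_cons_cons, List.getLast?_eq_some_getLast (by simp : b :: t ≠ [])]; simp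

theorem mem_lastD (l : List Int) (h : l ≠ []) (dflt : Int) : l.getLast?.getD dflt ∈ l := by
  rw [List.getLast?_eq_some_getLast h]; exact List.getLast_mem _

-- every element of a (· ≤ ·)-pairwise list is at most its last element
theorem le_lastD_of_pairwise (l : List Int) (hp : l.Pairwise (· ≤ ·)) (y : Int) (hy : y ∈ l)
    (dflt : Int) : y ≤ l.getLast?.getD dflt := by
  induction l generalizing dflt with
  | nil => simp at hy
  | cons a t ih =>
    rw [List.pairwise_cons] at hp
    rw [lastD_cons]
    rcases List.mem_cons.mp hy with rfl | hyt
    · cases t with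
      | nil => simp
      | cons b s => exact hp.1 _ (mem_lastD (b :: s) (by simp) y)
    · exact ih hp.2 hyt a

-- the B loop over a strictly increasing key segment produces exactly A's range lines
theorem bLoop_spec (d : PySem.Dict Int String) (ks : List Int) :
    ks.Pairwise (· < ·) →
    ∀ (p : Int) (acc : List String),
    (∀ k ∈ ks, p < k) →
    (∀ v, p < v → v ≤ ks.getLast?.getD p → (d.contains v = true ↔ v ∈ ks)) →
    bLoop d ks (some p) acc
      = acc ++ (PySem.List.pyRange (p + 1) (ks.getLast?.getD p + 1) 1).map (pvLine d) := by
  induction ks with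
  | nil =>
    intro _ p acc _ _
    rw [PySem.List.pyRange_one_eq_nil (by simp)]
    simp [bLoop]
  | cons k rest ih =>
    intro hs p acc hgt hmem
    rw [List.pairwise_cons] at hs
    have hpk : p < k := hgt k (List.mem_cons_self)
    have hlast : (k :: rest).getLast?.getD p = rest.getLast?.getD k := lastD_cons k rest p
    have hkL : k ≤ rest.getLast?.getD k := by
      cases rest with
      | nil => simp
      | cons b s => exact le_of_lt (hs.1 _ (mem_lastD (b :: s) (by simp) k))
    have hmem' : ∀ v, k < v → v ≤ rest.getLast?.getD k → (d.contains v = true ↔ v ∈ rest) := by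
      intro v hv1 hv2
      have h0 := hmem v (by omega) (by rw [hlast]; exact hv2)
      constructor
      · intro hc
        rcases List.mem_cons.mp (h0.mp hc) with rfl | hr
        · omega
        · exact hr
      · intro hr; exact h0.mpr (List.mem_cons_of_mem _ hr)
    have hck : d.contains k = true :=
      (hmem k hpk (by rw [hlast]; exact hkL)).mpr (List.mem_cons_self)
    have hgap : ∀ v ∈ PySem.List.pyRange (p + 1) k 1,
        pvLine d v = "    rsvd_" ++ PySem.Int.toStr v ++ " = " ++ PySem.Int.toStr v := by
      intro v hv
      have hb := PySem.List.mem_pyRange_one.mp hv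
      apply pvLine_rsvd
      by_contra hne
      have hc : d.contains v = true := by
        cases hcv : d.contains v with
        | true => rfl
        | false => exact absurd hcv hne
      rcases List.mem_cons.mp ((hmem v (by omega) (by rw [hlast]; omega)).mp hc) with rfl | hr
      · omega
      · have := hs.1 v hr; omega
    show bLoop d (k :: rest) (some p) acc = _
    rw [hlast]
    have hstep : bLoop d (k :: rest) (some p) acc
        = bLoop d rest (some k)
            ((acc ++ (PySem.List.pyRange (p + 1) k 1).map
              (fun v => "    rsvd_" ++ PySem.Int.toStr v ++ " = " ++ PySem.Int.toStr v))
             ++ ["    " ++ d.getD k "" ++ " = " ++ PySem.Int.toStr k]) := rfl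
    rw [hstep, ih hs.2 k _ hs.1 hmem']
    rw [PySem.List.pyRange_one_append (p + 1) k (rest.getLast?.getD k + 1) (by omega) (by omega)]
    rw [PySem.List.pyRange_one_cons (by omega : k < rest.getLast?.getD k + 1)]
    rw [List.map_append, List.map_cons]
    rw [List.map_congr_left hgap, pvLine_key d k hck]
    simp [List.append_assoc]

-- ===== VERDICT (by name: the statement is the Claim_ definition above) =====
theorem write_enum_items_spec : Claim_equal_write_enum_items := by
  intro dict _
  unfold Spec_write_enum_items write_enum_items write_enum_items_alt
  set d := PySem.Dict.ofList dict with hd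
  by_cases hempty : d.items = []
  · simp [hempty]
  · simp only [hempty, reduceIte]
    have hkeys : d.keys ≠ [] := by simpa [PySem.Dict.keys] using hempty
    cases hmin : PySem.List.min? d.keys (fun k => k) with
    | none => exact absurd ((PySem.List.min?_eq_none_iff _ _).mp hmin) hkeys
    | some mn =>
      cases hmax : PySem.List.max? d.keys (fun k => k) with
      | none => exact absurd ((PySem.List.max?_eq_none_iff _ _).mp hmax) hkeys
      | some mx =>
        dsimp only
        rw [filled_items d mn (mx + 1), List.map_map]
        have hA : ((fun p => "    " ++ p.2 ++ " = " ++ PySem.Int.toStr p.1) ∘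
            (fun v => (v, if d.contains v then d.getD v "" else "rsvd_" ++ PySem.Int.toStr v)))
            = pvLine d := by funext v; rfl
    
        rw [hA]
        have hnd : d.keys.Nodup := PySem.Dict.nodup_keys_ofList dict
        cases hsort : PySem.List.sorted d.keys (fun k => k) false with
        | nil => exact absurd ((PySem.List.sorted_eq_nil_iff _ _ _).mp hsort) hkeys
        | cons k0 rest =>
          have hperm : (k0 :: rest).Perm d.keys := by
            rw [← hsort]; exact PySem.List.sorted_perm _ _ _
          have hmemks : ∀ v, v ∈ (k0 :: rest) ↔ d.contains v = true := by
            intro v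
            rw [hperm.mem_iff, ← PySem.Dict.contains_iff_mem_keys]
          have hle' : (k0 :: rest).Pairwise (· ≤ ·) := by
            have := PySem.List.sorted_pairwise (xs := d.keys) (key := fun k => k)
            rw [hsort] at this; exact this
          have hndks : (k0 :: rest).Nodup := hperm.nodup_iff.mpr hnd
          have hlt : (k0 :: rest).Pairwise (· < ·) :=
            (hle'.and hndks).imp (fun h => lt_of_le_of_ne h.1 h.2)
          rw [List.pairwise_cons] at hlt
          have hmem' : ∀ v, k0 < v → v ≤ rest.getLast?.getD k0 → (d.contains v = true ↔ v ∈ rest) := by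
            intro v h1 _
            constructor
            · intro hc
              rcases List.mem_cons.mp ((hmemks v).mpr hc) with rfl | hr
              · omega
              · exact hr
            · intro hr; exact (hmemks v).mp (List.mem_cons_of_mem _ hr)
          have hck0 : d.contains k0 = true := (hmemks k0).mp (List.mem_cons_self)
          have hB : bLoop d (k0 :: rest) none []
              = bLoop d rest (some k0) (["    " ++ d.getD k0 "" ++ " = " ++ PySem.Int.toStr k0]) := rfl
          rw [hB, bLoop_spec d rest hlt.2 k0 _ hlt.1 hmem']
          have hlastc : (k0 :: rest).getLast?.getD k0 = rest.getLast?.getD k0 := lastD_cons k0 rest k0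
          have hLmem : rest.getLast?.getD k0 ∈ (k0 :: rest) := by
            rw [← hlastc]; exact mem_lastD _ (by simp) _
          have hmn : mn = k0 := by
            have h1 : mn ≤ k0 :=
              PySem.List.min?_isMin hmin k0 (hperm.mem_iff.mp (List.mem_cons_self))
            have h2 : k0 ≤ mn :=
              PySem.List.key_head_sorted_le d.keys (fun k => k) hsort mn (PySem.List.min?_mem hmin)
            omega
          have hmx : mx = rest.getLast?.getD k0 := by
            have h1 : rest.getLast?.getD k0 ≤ mx :=
              PySem.List.max?_isMax hmax _ (hperm.mem_iff.mp hLmem)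
            have h2 : mx ≤ rest.getLast?.getD k0 := by
              have hmxmem : mx ∈ (k0 :: rest) :=
                hperm.mem_iff.mpr (PySem.List.max?_mem hmax)
              have := le_lastD_of_pairwise (k0 :: rest) hle' mx hmxmem k0
              rw [hlastc] at this; exact this
            omega
          have hk0L : k0 ≤ rest.getLast?.getD k0 := by
            cases rest with
            | nil => simp
            | cons b s => exact le_of_lt (hlt.1 _ (mem_lastD (b :: s) (by simp) k0))
          rw [hmn, hmx]
          rw [PySem.List.pyRange_one_cons (by omega : k0 < rest.getLast?.getD k0 + 1)]
          rw [List.map_cons, pvLine_key d k0 hck0]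
          rfl
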